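-- pv_equiv track=rewrite | github.com/martintufte/rubiks-cube | tools/slice.py | apply
-- ===== SOURCE A (Python) =====
-- def apply(state, moves):
--     """
--     Return a copy of the state after applying the given moves
--     """
--     transforms = {
--         "R2": {1: 2, 2: 1},
--         "L2": {0: 3, 3: 0},
--         "F2": {2: 3, 3: 2},
--         "B2": {0: 1, 1: 0},
--         "E": {0: 3, 3: 2, 2: 1, 1: 0},
--         "E'": {0: 1, 1: 2, 2: 3, 3: 0},
--         "E2": {0: 2, 2: 0, 1: 3, 3: 1},
--     }
--     for move in moves:
--         tmp = state.copy()
--         for from_, to in transforms.get(move, {}).items():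
--             tmp[to] = state[from_]
--         state = tmp
--
--     return state
-- ===== SOURCE B (Python) =====
-- PERMS = {
--     "R2": (0, 2, 1, 3),
--     "L2": (3, 1, 2, 0),
--     "F2": (0, 1, 3, 2),
--     "B2": (1, 0, 2, 3),
--     "E": (1, 2, 3, 0),
--     "E'": (3, 0, 1, 2),
--     "E2": (2, 3, 0, 1),
-- }
--
--
-- def apply(state, moves):
--     """
--     Return a copy of the state after applying the given moves.
--
--     Composes all moves into one source permutation tuple over slots 0..3,
--     then applies it to the state in a single pass.
--     """
--     src = (0, 1, 2, 3)
--     for move in moves: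
--         p = PERMS.get(move)
--         if p is not None:
--             src = (src[p[0]], src[p[1]], src[p[2]], src[p[3]])
--     result = dict(state)
--     for i in range(4):
--         if src[i] != i:
--             result[i] = state[src[i]]
--     return result
-- ===== Notes on version B (the rewrite author's own statement) =====
-- stated objective: faster
-- what changed: B first folds the whole move list into a single composed source-permutation tuple over the four slots and then rewrites the state once in a single pass, instead of copying and rewriting the whole state dict once per move as A does.
import Mathlib
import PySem

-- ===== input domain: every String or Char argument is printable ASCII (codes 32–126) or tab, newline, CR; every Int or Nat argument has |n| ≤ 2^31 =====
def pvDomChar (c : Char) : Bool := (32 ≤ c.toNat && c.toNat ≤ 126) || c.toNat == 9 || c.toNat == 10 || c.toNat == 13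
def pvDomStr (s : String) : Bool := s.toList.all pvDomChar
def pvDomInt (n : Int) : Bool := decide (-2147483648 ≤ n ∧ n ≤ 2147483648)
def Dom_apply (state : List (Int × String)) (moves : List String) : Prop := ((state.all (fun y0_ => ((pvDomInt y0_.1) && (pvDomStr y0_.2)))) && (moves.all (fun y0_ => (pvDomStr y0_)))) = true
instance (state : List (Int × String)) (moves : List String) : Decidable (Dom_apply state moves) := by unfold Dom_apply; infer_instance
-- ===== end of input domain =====

-- B composes all the moves into one source permutation tuple over the four slots first,
-- then applies it to the state in a single pass, instead of rewriting a full copy of the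
-- state once per move as A does.

-- ===== PORT A =====
-- the transforms table of A (dict of dicts, insertion order)
def pvTransforms : PySem.Dict String (PySem.Dict Int Int) :=
  PySem.Dict.mk
    [ ("R2", PySem.Dict.mk [(1, 2), (2, 1)])
    , ("L2", PySem.Dict.mk [(0, 3), (3, 0)])
    , ("F2", PySem.Dict.mk [(2, 3), (3, 2)])
    , ("B2", PySem.Dict.mk [(0, 1), (1, 0)])
    , ("E",  PySem.Dict.mk [(0, 3), (3, 2), (2, 1), (1, 0)])
    , ("E'", PySem.Dict.mk [(0, 1), (1, 2), (2, 3), (3, 0)])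
    , ("E2", PySem.Dict.mk [(0, 2), (2, 0), (1, 3), (3, 1)]) ]

-- 'tmp[to] = state[from_]' raises KeyError when from_ is missing; the "" default of
-- getD is reachable only outside Pre_apply, which excludes exactly those inputs.
def apply (state : List (Int × String)) (moves : List String) : List (Int × String) :=
  (moves.foldl
    (fun st move =>
      (PySem.Dict.getD pvTransforms move PySem.Dict.empty).items.foldl
        (fun tmp p => PySem.Dict.insert tmp p.2 (PySem.Dict.getD st p.1 ""))
        st)
    (PySem.Dict.mk state)).items

-- ===== PORT B =====
-- PERMS.get(move): B's per-move source permutation, as a 4-tuple over slots 0..3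
def pvPerm? (m : String) : Option (Int × Int × Int × Int) :=
  if m = "R2" then some (0, 2, 1, 3)
  else if m = "L2" then some (3, 1, 2, 0)
  else if m = "F2" then some (0, 1, 3, 2)
  else if m = "B2" then some (1, 0, 2, 3)
  else if m = "E" then some (1, 2, 3, 0)
  else if m = "E'" then some (3, 0, 1, 2)
  else if m = "E2" then some (2, 3, 0, 1)
  else none

-- tuple indexing t[k] for k ∈ {0,1,2,3} (the only indices B ever uses)
def pvTupGet (t : Int × Int × Int × Int) (k : Int) : Int :=
  if k = 0 then t.1 else if k = 1 then t.2.1 else if k = 2 then t.2.2.1 else t.2.2.2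

-- 'state[src[i]]' raises KeyError when src[i] is missing; the "" default is reachable
-- only outside Pre_apply.
def apply_alt (state : List (Int × String)) (moves : List String) : List (Int × String) :=
  let src := moves.foldl
    (fun src move =>
      match pvPerm? move with
      | some p => (pvTupGet src p.1, pvTupGet src p.2.1, pvTupGet src p.2.2.1, pvTupGet src p.2.2.2)
      | none => src)
    ((0, 1, 2, 3) : Int × Int × Int × Int)
  (([0, 1, 2, 3] : List Int).foldl
    (fun result i =>
      if pvTupGet src i ≠ i then
        PySem.Dict.insert result i (PySem.Dict.getD (PySem.Dict.mk state) (pvTupGet src i) "")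
      else result)
    (PySem.Dict.mk state)).items

-- ===== PRECONDITION & SPEC =====
-- the keys of 'state' that a move reads (and writes); [] for unrecognised moves
def pvTouched (m : String) : List Int :=
  if m = "R2" then [1, 2]
  else if m = "L2" then [0, 3]
  else if m = "F2" then [2, 3]
  else if m = "B2" then [0, 1]
  else if m = "E" ∨ m = "E'" ∨ m = "E2" then [0, 1, 2, 3]
  else []

-- Pre_ excludes (1) association lists with duplicate keys, which cannot arise from a
-- Python dict, and (2) inputs where some move reads a key missing from state, on which
-- A raises KeyError.
def Pre_apply (state : List (Int × String)) (moves : List String) : Prop :=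
  (state.map Prod.fst).Nodup ∧
    ∀ m ∈ moves, ∀ k ∈ pvTouched m, k ∈ state.map Prod.fst

instance (state : List (Int × String)) (moves : List String) : Decidable (Pre_apply state moves) := by
  unfold Pre_apply; infer_instance

def pvWitness_apply : (List (Int × String)) × List String :=
  ([(0, "UF"), (1, "UR"), (2, "UB"), (3, "UL")], ["E", "R2", "x", "E'"])

def Spec_apply (state : List (Int × String)) (moves : List String) (out : List (Int × String)) : Prop := out = apply_alt state moves
instance (state : List (Int × String)) (moves : List String) (out : List (Int × String)) : Decidable (Spec_apply state moves out) := by unfold Spec_apply; infer_instance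

-- ===== CLAIM (what is proved, stated in full; the proofs are below) =====
def Claim_equal_apply : Prop := ∀ (state : List (Int × String)) (moves : List String), Dom_apply state moves → Pre_apply state moves → Spec_apply state moves (apply state moves)

-- ===== LEMMAS AND PROOFS =====

-- the composed source map: after the processed moves, slot k holds state[pvSigma … k]
def pvSigma (a b c d k : Int) : Int :=
  if k = 0 then a else if k = 1 then b else if k = 2 then c else if k = 3 then d else k

-- a slot's source is either the slot itself or a key of state (and then the slot too)
def pvGood (state : List (Int × String)) (x i : Int) : Prop :=
  x = i ∨ (x ∈ (PySem.Dict.mk state).keys ∧ i ∈ (PySem.Dict.mk state).keys)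

structure PVInv (state : List (Int × String)) (st : PySem.Dict Int String) (a b c d : Int) : Prop where
  keys : st.keys = (PySem.Dict.mk state).keys
  ga : pvGood state a 0
  gb : pvGood state b 1
  gc : pvGood state c 2
  gd : pvGood state d 3
  get : ∀ k : Int, st.get? k = (PySem.Dict.mk state).get? (pvSigma a b c d k)

-- A's loop body and B's composition-loop body, named for the proofs (defeq to the ports')
def pvStepA (st : PySem.Dict Int String) (move : String) : PySem.Dict Int String :=
  (PySem.Dict.getD pvTransforms move PySem.Dict.empty).items.foldl
    (fun tmp p => PySem.Dict.insert tmp p.2 (PySem.Dict.getD st p.1 "")) st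

def pvStepS (src : Int × Int × Int × Int) (move : String) : Int × Int × Int × Int :=
  match pvPerm? move with
  | some p => (pvTupGet src p.1, pvTupGet src p.2.1, pvTupGet src p.2.2.1, pvTupGet src p.2.2.2)
  | none => src

lemma pv_apply_eq (state : List (Int × String)) (moves : List String) :
    apply state moves = (moves.foldl pvStepA (PySem.Dict.mk state)).items := rfl

lemma pv_apply_alt_eq (state : List (Int × String)) (moves : List String) :
    apply_alt state moves =
      (([0, 1, 2, 3] : List Int).foldl
        (fun result i =>
          if pvTupGet (moves.foldl pvStepS (0, 1, 2, 3)) i ≠ i then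
            PySem.Dict.insert result i
              (PySem.Dict.getD (PySem.Dict.mk state)
                (pvTupGet (moves.foldl pvStepS (0, 1, 2, 3)) i) "")
          else result)
        (PySem.Dict.mk state)).items := rfl

lemma pv_some_getD {d : PySem.Dict Int String} {k : Int} (h : k ∈ d.keys) :
    some (d.getD k "") = d.get? k := by
  cases hc : d.get? k with
  | none => exact absurd ((PySem.Dict.get?_eq_none_iff_not_mem_keys d k).mp hc) (by simpa using h)
  | some v => simp [PySem.Dict.getD_eq_get?_getD, hc]

lemma pvGood_move {state : List (Int × String)} {x i j : Int} (hx : pvGood state x i)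
    (hi : i ∈ (PySem.Dict.mk state).keys) (hj : j ∈ (PySem.Dict.mk state).keys) :
    pvGood state x j := by
  rcases hx with hx | hx
  · subst hx; exact Or.inr ⟨hi, hj⟩
  · exact Or.inr ⟨hx.1, hj⟩

lemma pv_read {state : List (Int × String)} {st : PySem.Dict Int String} {a b c d : Int}
    (inv : PVInv state st a b c d) {j : Int} (hj : j ∈ (PySem.Dict.mk state).keys) :
    some (st.getD j "") = (PySem.Dict.mk state).get? (pvSigma a b c d j) := by
  rw [pv_some_getD (inv.keys.symm ▸ hj), inv.get j]

lemma pv_keys_insert {state : List (Int × String)} {st' : PySem.Dict Int String}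
    (h : st'.keys = (PySem.Dict.mk state).keys) {i : Int}
    (hi : i ∈ (PySem.Dict.mk state).keys) (v : String) :
    (st'.insert i v).keys = (PySem.Dict.mk state).keys := by
  rw [PySem.Dict.keys_insert_of_contains _ v
    ((PySem.Dict.contains_iff_mem_keys _ _).mpr (h.symm ▸ hi)), h]

lemma pv_get?_none (m : String) (h1 : m ≠ "R2") (h2 : m ≠ "L2") (h3 : m ≠ "F2")
    (h4 : m ≠ "B2") (h5 : m ≠ "E") (h6 : m ≠ "E'") (h7 : m ≠ "E2") :
    PySem.Dict.get? pvTransforms m = none := by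
  rw [pvTransforms, PySem.Dict.get?_mk_cons, if_neg (by simpa using Ne.symm h1),
    PySem.Dict.get?_mk_cons, if_neg (by simpa using Ne.symm h2),
    PySem.Dict.get?_mk_cons, if_neg (by simpa using Ne.symm h3),
    PySem.Dict.get?_mk_cons, if_neg (by simpa using Ne.symm h4),
    PySem.Dict.get?_mk_cons, if_neg (by simpa using Ne.symm h5),
    PySem.Dict.get?_mk_cons, if_neg (by simpa using Ne.symm h6),
    PySem.Dict.get?_mk_cons, if_neg (by simpa using Ne.symm h7)]
  rfl

lemma pv_step1 (state : List (Int × String)) (st : PySem.Dict Int String)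
    (a b c d : Int) (m : String)
    (hm : ∀ k ∈ pvTouched m, k ∈ state.map Prod.fst)
    (inv : PVInv state st a b c d) :
    ∃ a' b' c' d', pvStepS (a, b, c, d) m = (a', b', c', d') ∧
      PVInv state (pvStepA st m) a' b' c' d' := by
  have hk : ∀ k : Int, k ∈ pvTouched m → k ∈ (PySem.Dict.mk state).keys := by
    intro k h
    simpa [PySem.Dict.keys] using hm k h
  by_cases hR2 : m = "R2"
  · subst hR2
    have h1 := hk 1 (by simp [pvTouched])
    have h2 := hk 2 (by simp [pvTouched])
    refine ⟨a, c, b, d, rfl, ?_⟩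
    have hA : pvStepA st "R2" =
        (st.insert 2 (st.getD 1 "")).insert 1 (st.getD 2 "") := rfl
    rw [hA]
    refine ⟨pv_keys_insert (pv_keys_insert inv.keys h2 _) h1 _,
      inv.ga, pvGood_move inv.gc h2 h1, pvGood_move inv.gb h1 h2, inv.gd, ?_⟩
    intro k
    rw [PySem.Dict.get?_insert, PySem.Dict.get?_insert]
    by_cases hk1 : k = 1
    · subst hk1
      rw [if_pos rfl, pv_read inv h2]
      congr 1
    · by_cases hk2 : k = 2
      · subst hk2
        rw [if_neg (by norm_num), if_pos rfl, pv_read inv h1]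
        congr 1
      · rw [if_neg hk1, if_neg hk2, inv.get k]
        congr 1; unfold pvSigma; split_ifs <;> simp_all
  · by_cases hL2 : m = "L2"
    · subst hL2
      have h0 := hk 0 (by simp [pvTouched])
      have h3 := hk 3 (by simp [pvTouched])
      refine ⟨d, b, c, a, rfl, ?_⟩
      have hA : pvStepA st "L2" =
          (st.insert 3 (st.getD 0 "")).insert 0 (st.getD 3 "") := rfl
      rw [hA]
      refine ⟨pv_keys_insert (pv_keys_insert inv.keys h3 _) h0 _,
        pvGood_move inv.gd h3 h0, inv.gb, inv.gc, pvGood_move inv.ga h0 h3, ?_⟩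
      intro k
      rw [PySem.Dict.get?_insert, PySem.Dict.get?_insert]
      by_cases hk0 : k = 0
      · subst hk0
        rw [if_pos rfl, pv_read inv h3]
        congr 1
      · by_cases hk3 : k = 3
        · subst hk3
          rw [if_neg (by norm_num), if_pos rfl, pv_read inv h0]
          congr 1
        · rw [if_neg hk0, if_neg hk3, inv.get k]
          congr 1; unfold pvSigma; split_ifs <;> simp_all
    · by_cases hF2 : m = "F2"
      · subst hF2
        have h2 := hk 2 (by simp [pvTouched])
        have h3 := hk 3 (by simp [pvTouched])
        refine ⟨a, b, d, c, rfl, ?_⟩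
        have hA : pvStepA st "F2" =
            (st.insert 3 (st.getD 2 "")).insert 2 (st.getD 3 "") := rfl
        rw [hA]
        refine ⟨pv_keys_insert (pv_keys_insert inv.keys h3 _) h2 _,
          inv.ga, inv.gb, pvGood_move inv.gd h3 h2, pvGood_move inv.gc h2 h3, ?_⟩
        intro k
        rw [PySem.Dict.get?_insert, PySem.Dict.get?_insert]
        by_cases hk2 : k = 2
        · subst hk2
          rw [if_pos rfl, pv_read inv h3]
          congr 1
        · by_cases hk3 : k = 3
          · subst hk3
            rw [if_neg (by norm_num), if_pos rfl, pv_read inv h2]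
            congr 1
          · rw [if_neg hk2, if_neg hk3, inv.get k]
            congr 1; unfold pvSigma; split_ifs <;> simp_all
      · by_cases hB2 : m = "B2"
        · subst hB2
          have h0 := hk 0 (by simp [pvTouched])
          have h1 := hk 1 (by simp [pvTouched])
          refine ⟨b, a, c, d, rfl, ?_⟩
          have hA : pvStepA st "B2" =
              (st.insert 1 (st.getD 0 "")).insert 0 (st.getD 1 "") := rfl
          rw [hA]
          refine ⟨pv_keys_insert (pv_keys_insert inv.keys h1 _) h0 _,
            pvGood_move inv.gb h1 h0, pvGood_move inv.ga h0 h1, inv.gc, inv.gd, ?_⟩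
          intro k
          rw [PySem.Dict.get?_insert, PySem.Dict.get?_insert]
          by_cases hk0 : k = 0
          · subst hk0
            rw [if_pos rfl, pv_read inv h1]
            congr 1
          · by_cases hk1 : k = 1
            · subst hk1
              rw [if_neg (by norm_num), if_pos rfl, pv_read inv h0]
              congr 1
            · rw [if_neg hk0, if_neg hk1, inv.get k]
              congr 1; unfold pvSigma; split_ifs <;> simp_all
        · by_cases hE : m = "E"
          · subst hE
            have h0 := hk 0 (by simp [pvTouched])
            have h1 := hk 1 (by simp [pvTouched])
            have h2 := hk 2 (by simp [pvTouched])
            have h3 := hk 3 (by simp [pvTouched])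
            refine ⟨b, c, d, a, rfl, ?_⟩
            have hA : pvStepA st "E" =
                ((((st.insert 3 (st.getD 0 "")).insert 2 (st.getD 3 "")).insert 1
                  (st.getD 2 "")).insert 0 (st.getD 1 "")) := rfl
            rw [hA]
            refine ⟨pv_keys_insert (pv_keys_insert (pv_keys_insert
                (pv_keys_insert inv.keys h3 _) h2 _) h1 _) h0 _,
              pvGood_move inv.gb h1 h0, pvGood_move inv.gc h2 h1,
              pvGood_move inv.gd h3 h2, pvGood_move inv.ga h0 h3, ?_⟩
            intro k
            rw [PySem.Dict.get?_insert, PySem.Dict.get?_insert,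
              PySem.Dict.get?_insert, PySem.Dict.get?_insert]
            by_cases hk0 : k = 0
            · subst hk0
              rw [if_pos rfl, pv_read inv h1]
              congr 1
            · by_cases hk1 : k = 1
              · subst hk1
                rw [if_neg (by norm_num), if_pos rfl, pv_read inv h2]
                congr 1
              · by_cases hk2 : k = 2
                · subst hk2
                  rw [if_neg (by norm_num), if_neg (by norm_num), if_pos rfl,
                    pv_read inv h3]
                  congr 1
                · by_cases hk3 : k = 3
                  · subst hk3
                    rw [if_neg (by norm_num), if_neg (by norm_num),
                      if_neg (by norm_num), if_pos rfl, pv_read inv h0]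
                    congr 1
                  · rw [if_neg hk0, if_neg hk1, if_neg hk2, if_neg hk3, inv.get k]
                    congr 1; unfold pvSigma; split_ifs <;> simp_all
          · by_cases hE' : m = "E'"
            · subst hE'
              have h0 := hk 0 (by simp [pvTouched])
              have h1 := hk 1 (by simp [pvTouched])
              have h2 := hk 2 (by simp [pvTouched])
              have h3 := hk 3 (by simp [pvTouched])
              refine ⟨d, a, b, c, rfl, ?_⟩
              have hA : pvStepA st "E'" =
                  ((((st.insert 1 (st.getD 0 "")).insert 2 (st.getD 1 "")).insert 3
                    (st.getD 2 "")).insert 0 (st.getD 3 "")) := rfl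
              rw [hA]
              refine ⟨pv_keys_insert (pv_keys_insert (pv_keys_insert
                  (pv_keys_insert inv.keys h1 _) h2 _) h3 _) h0 _,
                pvGood_move inv.gd h3 h0, pvGood_move inv.ga h0 h1,
                pvGood_move inv.gb h1 h2, pvGood_move inv.gc h2 h3, ?_⟩
              intro k
              rw [PySem.Dict.get?_insert, PySem.Dict.get?_insert,
                PySem.Dict.get?_insert, PySem.Dict.get?_insert]
              by_cases hk0 : k = 0
              · subst hk0
                rw [if_pos rfl, pv_read inv h3]
                congr 1
              · by_cases hk3 : k = 3
                · subst hk3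
                  rw [if_neg (by norm_num), if_pos rfl, pv_read inv h2]
                  congr 1
                · by_cases hk2 : k = 2
                  · subst hk2
                    rw [if_neg (by norm_num), if_neg (by norm_num), if_pos rfl,
                      pv_read inv h1]
                    congr 1
                  · by_cases hk1 : k = 1
                    · subst hk1
                      rw [if_neg (by norm_num), if_neg (by norm_num),
                        if_neg (by norm_num), if_pos rfl, pv_read inv h0]
                      congr 1
                    · rw [if_neg hk0, if_neg hk3, if_neg hk2, if_neg hk1, inv.get k]
                      congr 1; unfold pvSigma; split_ifs <;> simp_all
            · by_cases hE2 : m = "E2"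
              · subst hE2
                have h0 := hk 0 (by simp [pvTouched])
                have h1 := hk 1 (by simp [pvTouched])
                have h2 := hk 2 (by simp [pvTouched])
                have h3 := hk 3 (by simp [pvTouched])
                refine ⟨c, d, a, b, rfl, ?_⟩
                have hA : pvStepA st "E2" =
                    ((((st.insert 2 (st.getD 0 "")).insert 0 (st.getD 2 "")).insert 3
                      (st.getD 1 "")).insert 1 (st.getD 3 "")) := rfl
                rw [hA]
                refine ⟨pv_keys_insert (pv_keys_insert (pv_keys_insert
                    (pv_keys_insert inv.keys h2 _) h0 _) h3 _) h1 _,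
                  pvGood_move inv.gc h2 h0, pvGood_move inv.gd h3 h1,
                  pvGood_move inv.ga h0 h2, pvGood_move inv.gb h1 h3, ?_⟩
                intro k
                rw [PySem.Dict.get?_insert, PySem.Dict.get?_insert,
                  PySem.Dict.get?_insert, PySem.Dict.get?_insert]
                by_cases hk1 : k = 1
                · subst hk1
                  rw [if_pos rfl, pv_read inv h3]
                  congr 1
                · by_cases hk3 : k = 3
                  · subst hk3
                    rw [if_neg (by norm_num), if_pos rfl, pv_read inv h1]
                    congr 1
                  · by_cases hk0 : k = 0
                    · subst hk0
                      rw [if_neg (by norm_num), if_neg (by norm_num), if_pos rfl,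
                        pv_read inv h2]
                      congr 1
                    · by_cases hk2 : k = 2
                      · subst hk2
                        rw [if_neg (by norm_num), if_neg (by norm_num),
                          if_neg (by norm_num), if_pos rfl, pv_read inv h0]
                        congr 1
                      · rw [if_neg hk1, if_neg hk3, if_neg hk0, if_neg hk2, inv.get k]
                        congr 1; unfold pvSigma; split_ifs <;> simp_all
              · have hnone : PySem.Dict.get? pvTransforms m = none :=
                  pv_get?_none m hR2 hL2 hF2 hB2 hE hE' hE2
                have hnoneB : pvPerm? m = none := by
                  unfold pvPerm?
                  rw [if_neg hR2, if_neg hL2, if_neg hF2, if_neg hB2, if_neg hE,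
                    if_neg hE', if_neg hE2]
                refine ⟨a, b, c, d, ?_, ?_⟩
                · unfold pvStepS; rw [hnoneB]
                · have hA : pvStepA st m = st := by
                    unfold pvStepA
                    rw [PySem.Dict.getD_eq_get?_getD, hnone]
                    rfl
                  rw [hA]; exact inv

lemma pv_main (state : List (Int × String)) (moves : List String)
    (st : PySem.Dict Int String) (a b c d : Int)
    (hm : ∀ m ∈ moves, ∀ k ∈ pvTouched m, k ∈ state.map Prod.fst)
    (inv : PVInv state st a b c d) :
    ∃ a' b' c' d', moves.foldl pvStepS (a, b, c, d) = (a', b', c', d') ∧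
      PVInv state (moves.foldl pvStepA st) a' b' c' d' := by
  induction moves generalizing st a b c d with
  | nil => exact ⟨a, b, c, d, rfl, inv⟩
  | cons m ms ih =>
    obtain ⟨a1, b1, c1, d1, hS, hI⟩ :=
      pv_step1 state st a b c d m (hm m (by simp)) inv
    obtain ⟨a', b', c', d', hS', hI'⟩ :=
      ih (pvStepA st m) a1 b1 c1 d1 (fun x hx => hm x (by simp [hx])) hI
    exact ⟨a', b', c', d', by simpa [List.foldl_cons, hS] using hS', by simpa using hI'⟩

def pvG (state : List (Int × String)) (i x : Int) (r : PySem.Dict Int String) :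
    PySem.Dict Int String :=
  if x ≠ i then r.insert i ((PySem.Dict.mk state).getD x "") else r

lemma pvG_keys {state : List (Int × String)} {i x : Int} {r : PySem.Dict Int String}
    (h : x ≠ i → i ∈ r.keys) : (pvG state i x r).keys = r.keys := by
  unfold pvG; split_ifs with hx
  · exact PySem.Dict.keys_insert_of_contains _ _
      ((PySem.Dict.contains_iff_mem_keys _ _).mpr (h hx))
  · rfl

lemma pvG_get?_ne {state : List (Int × String)} {i x k : Int} {r : PySem.Dict Int String}
    (hk : k ≠ i) : (pvG state i x r).get? k = r.get? k := by
  unfold pvG; split_ifs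
  · rw [PySem.Dict.get?_insert, if_neg hk]
  · rfl

lemma pvG_get?_self {state : List (Int × String)} {i x : Int} {r : PySem.Dict Int String} :
    (pvG state i x r).get? i =
      if x = i then r.get? i else some ((PySem.Dict.mk state).getD x "") := by
  unfold pvG; split_ifs with h1 h2 <;> simp_all [PySem.Dict.get?_insert]

lemma pv_phase2 (state : List (Int × String)) (st : PySem.Dict Int String)
    (a b c d : Int) (hnd : (state.map Prod.fst).Nodup)
    (inv : PVInv state st a b c d) :
    (([0, 1, 2, 3] : List Int).foldl
      (fun result i =>
        if pvTupGet (a, b, c, d) i ≠ i then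
          PySem.Dict.insert result i
            (PySem.Dict.getD (PySem.Dict.mk state) (pvTupGet (a, b, c, d) i) "")
        else result)
      (PySem.Dict.mk state)).items = st.items := by
  have hfold :
      (([0, 1, 2, 3] : List Int).foldl
        (fun result i =>
          if pvTupGet (a, b, c, d) i ≠ i then
            PySem.Dict.insert result i
              (PySem.Dict.getD (PySem.Dict.mk state) (pvTupGet (a, b, c, d) i) "")
          else result)
        (PySem.Dict.mk state)) =
      pvG state 3 d (pvG state 2 c (pvG state 1 b (pvG state 0 a (PySem.Dict.mk state)))) := by
    simp only [List.foldl_cons, List.foldl_nil, pvG, pvTupGet]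
    norm_num
  rw [hfold]
  have k0 : (pvG state 0 a (PySem.Dict.mk state)).keys = (PySem.Dict.mk state).keys :=
    pvG_keys (fun hx => (inv.ga.resolve_left hx).2)
  have k1 : (pvG state 1 b (pvG state 0 a (PySem.Dict.mk state))).keys =
      (PySem.Dict.mk state).keys := by
    rw [pvG_keys (fun hx => k0.symm ▸ (inv.gb.resolve_left hx).2), k0]
  have k2 : (pvG state 2 c (pvG state 1 b (pvG state 0 a (PySem.Dict.mk state)))).keys =
      (PySem.Dict.mk state).keys := by
    rw [pvG_keys (fun hx => k1.symm ▸ (inv.gc.resolve_left hx).2), k1]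
  have k3 : (pvG state 3 d (pvG state 2 c (pvG state 1 b
      (pvG state 0 a (PySem.Dict.mk state))))).keys = (PySem.Dict.mk state).keys := by
    rw [pvG_keys (fun hx => k2.symm ▸ (inv.gd.resolve_left hx).2), k2]
  have hndD : (PySem.Dict.mk state).keys.Nodup := by
    simpa [PySem.Dict.keys] using hnd
  have hget : ∀ k : Int,
      (pvG state 3 d (pvG state 2 c (pvG state 1 b
        (pvG state 0 a (PySem.Dict.mk state))))).get? k =
      (PySem.Dict.mk state).get? (pvSigma a b c d k) := by
    intro k
    by_cases hk0 : k = 0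
    · subst hk0
      rw [pvG_get?_ne (by norm_num), pvG_get?_ne (by norm_num),
        pvG_get?_ne (by norm_num), pvG_get?_self,
        show pvSigma a b c d 0 = a by norm_num [pvSigma]]
      by_cases ha : a = 0
      · rw [if_pos ha, ha]
      · rw [if_neg ha, pv_some_getD (inv.ga.resolve_left ha).1]
    · by_cases hk1 : k = 1
      · subst hk1
        rw [pvG_get?_ne (by norm_num), pvG_get?_ne (by norm_num), pvG_get?_self,
          show pvSigma a b c d 1 = b by norm_num [pvSigma]]
        by_cases hb : b = 1
        · rw [if_pos hb, pvG_get?_ne (by norm_num), hb]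
        · rw [if_neg hb, pv_some_getD (inv.gb.resolve_left hb).1]
      · by_cases hk2 : k = 2
        · subst hk2
          rw [pvG_get?_ne (by norm_num), pvG_get?_self,
            show pvSigma a b c d 2 = c by norm_num [pvSigma]]
          by_cases hc : c = 2
          · rw [if_pos hc, pvG_get?_ne (by norm_num), pvG_get?_ne (by norm_num), hc]
          · rw [if_neg hc, pv_some_getD (inv.gc.resolve_left hc).1]
        · by_cases hk3 : k = 3
          · subst hk3
            rw [pvG_get?_self, show pvSigma a b c d 3 = d by norm_num [pvSigma]]
            by_cases hd : d = 3
            · rw [if_pos hd, pvG_get?_ne (by norm_num), pvG_get?_ne (by norm_num),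
                pvG_get?_ne (by norm_num), hd]
            · rw [if_neg hd, pv_some_getD (inv.gd.resolve_left hd).1]
          · rw [pvG_get?_ne hk3, pvG_get?_ne hk2, pvG_get?_ne hk1, pvG_get?_ne hk0]
            congr 1; unfold pvSigma; split_ifs <;> simp_all
  have hi1 := PySem.Dict.items_eq_map_keys _ (k3 ▸ hndD) ""
  have hi2 := PySem.Dict.items_eq_map_keys st (inv.keys ▸ hndD) ""
  rw [hi1, hi2, k3, inv.keys]
  refine List.map_congr_left ?_
  intro k _
  have : (pvG state 3 d (pvG state 2 c (pvG state 1 b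
      (pvG state 0 a (PySem.Dict.mk state))))).getD k "" = st.getD k "" := by
    rw [PySem.Dict.getD_eq_get?_getD, PySem.Dict.getD_eq_get?_getD, hget k, inv.get k]
  rw [this]

-- ===== VERDICT (by name: the statement is the Claim_ definition above) =====
theorem apply_spec : Claim_equal_apply := by
  intro state moves _hDom hPre
  obtain ⟨hnd, hm⟩ := hPre
  unfold Spec_apply
  rw [pv_apply_eq, pv_apply_alt_eq]
  have inv0 : PVInv state (PySem.Dict.mk state) 0 1 2 3 := by
    refine ⟨rfl, Or.inl rfl, Or.inl rfl, Or.inl rfl, Or.inl rfl, ?_⟩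
    intro k
    unfold pvSigma
    split_ifs <;> simp_all
  obtain ⟨a, b, c, d, hS, hI⟩ := pv_main state moves (PySem.Dict.mk state) 0 1 2 3 hm inv0
  rw [hS]
  exact (pv_phase2 state _ a b c d hnd hI).symm
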